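-- pv_equiv track=rewrite | github.com/siddharthcurious/Pythonic3-Feel | LeetCode/696-TLE.py | equalZeroOne
-- ===== SOURCE A (Python) =====
-- def equalZeroOne(sub):
--     if sub[0] == "0":
--         i = 0
--         j = len(sub)-1
--         while i < j:
--             if sub[i] == "0" and sub[j] == "1":
--                 i += 1
--                 j -= 1
--             else:
--                 break
--         if i-j == 1:
--             return True
--         return False
--
--     if sub[0] == "1":
--         i = 0
--         j = len(sub)-1
--         while i < j:
--             if sub[i] == "1" and sub[j] == "0":
--                 i += 1
--                 j -= 1
--             else:
--                 break
--         if i-j == 1: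
--             return True
--         return False
-- ===== SOURCE B (Python) =====
-- def equalZeroOne(sub):
--     first = sub[0]
--     k = len(sub) // 2
--     if first == "0":
--         return sub == "0" * k + "1" * k
--     if first == "1":
--         return sub == "1" * k + "0" * k
-- ===== Notes on version B (the rewrite author's own statement) =====
-- stated objective: simpler
-- what changed: Replaces the duplicated two-pointer while-loops with building the expected pattern string ('0'*k+'1'*k or '1'*k+'0'*k, k = len//2) and a single equality comparison.
import Mathlib
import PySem

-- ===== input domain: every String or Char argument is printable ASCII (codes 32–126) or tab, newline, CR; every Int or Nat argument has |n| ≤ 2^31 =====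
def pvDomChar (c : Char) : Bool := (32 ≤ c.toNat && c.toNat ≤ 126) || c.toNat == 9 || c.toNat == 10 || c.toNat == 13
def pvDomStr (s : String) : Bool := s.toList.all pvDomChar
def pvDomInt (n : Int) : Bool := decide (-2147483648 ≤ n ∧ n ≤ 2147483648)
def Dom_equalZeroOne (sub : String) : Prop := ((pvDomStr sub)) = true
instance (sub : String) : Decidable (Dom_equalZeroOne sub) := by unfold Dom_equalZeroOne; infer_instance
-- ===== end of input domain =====

-- B replaces A's two duplicated two-pointer while-loops by building the expected
-- pattern (c repeated k times ++ d repeated k times, k = len//2) and one equality test (objective: simpler).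

-- ===== PORT A =====
-- A's while-loop (both branches of A run this same loop, with (c,d) = ('0','1') resp. ('1','0'))
def eqLoop (s : List Char) (c d : Char) (i j : Int) : Int × Int :=
  if _h : i < j then
    if PySem.List.pyGet? s i = some c ∧ PySem.List.pyGet? s j = some d then
      eqLoop s c d (i + 1) (j - 1)
    else (i, j)
  else (i, j)
termination_by (j - i).toNat
decreasing_by omega

def equalZeroOne (sub : String) : Option Bool :=
  let s := sub.toList
  if PySem.List.pyGet? s 0 = some '0' then
    let p := eqLoop s '0' '1' 0 (PySem.List.len s - 1)
    some (if p.1 - p.2 = 1 then true else false)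
  else if PySem.List.pyGet? s 0 = some '1' then
    let p := eqLoop s '1' '0' 0 (PySem.List.len s - 1)
    some (if p.1 - p.2 = 1 then true else false)
  else none   -- Python falls through and returns None

-- ===== PORT B =====
def equalZeroOne_alt (sub : String) : Option Bool :=
  let s := sub.toList
  match PySem.List.pyGet? s 0 with   -- first = sub[0]; none = IndexError, excluded by Pre_
  | none => none
  | some first =>
    let k := s.length / 2            -- k = len(sub) // 2
    if first = '0' then some (s == List.replicate k '0' ++ List.replicate k '1')
    else if first = '1' then some (s == List.replicate k '1' ++ List.replicate k '0')
    else none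

-- ===== PRECONDITION & SPEC =====
-- A raises IndexError at sub[0] on the empty string (B raises there too); everything else is admitted.
def Pre_equalZeroOne (sub : String) : Prop := sub ≠ ""
instance (sub : String) : Decidable (Pre_equalZeroOne sub) := by unfold Pre_equalZeroOne; infer_instance
def pvWitness_equalZeroOne : String := "0011"

def Spec_equalZeroOne (sub : String) (out : Option Bool) : Prop := out = equalZeroOne_alt sub
instance (sub : String) (out : Option Bool) : Decidable (Spec_equalZeroOne sub out) := by unfold Spec_equalZeroOne; infer_instance

-- ===== CLAIM (what is proved, stated in full; the proofs are below) =====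
def Claim_equal_equalZeroOne : Prop := ∀ (sub : String), Dom_equalZeroOne sub → Pre_equalZeroOne sub → Spec_equalZeroOne sub (equalZeroOne sub)

-- ===== LEMMAS AND PROOFS =====

-- characterisation of A's while-loop: from a reachable state (0 ≤ i ≤ j+1) it ends
-- with i - j = 1 iff the gap j - i is odd and every pair (t, i+j-t) it visits matches (c, d).
theorem eqLoop_spec (s : List Char) (c d : Char) :
    ∀ n (i j : Int), (j - i).toNat = n → 0 ≤ i → i ≤ j + 1 →
      ((eqLoop s c d i j).1 - (eqLoop s c d i j).2 = 1 ↔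
        ((j - i) % 2 = 1 ∧ ∀ t : Int, i ≤ t → 2 * t < i + j →
            PySem.List.pyGet? s t = some c ∧ PySem.List.pyGet? s (i + j - t) = some d)) := by
  intro n
  induction n using Nat.strong_induction_on with
  | _ n ih =>
    intro i j hn h0 hij
    rw [eqLoop]
    by_cases hlt : i < j
    · simp only [hlt, dif_pos]
      by_cases hm : PySem.List.pyGet? s i = some c ∧ PySem.List.pyGet? s j = some d
      · rw [if_pos hm]
        have hrec := ih ((j - 1) - (i + 1)).toNat (by omega) (i + 1) (j - 1) rfl (by omega) (by omega)
        rw [hrec]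
        constructor
        · rintro ⟨hpar, hall⟩
          refine ⟨by omega, ?_⟩
          intro t ht htlt
          rcases eq_or_lt_of_le ht with he | hl
          · constructor
            · rw [← he]; exact hm.1
            · rw [show i + j - t = j by omega]; exact hm.2
          · have := hall t (by omega) (by omega)
            simpa [show i + j - t = i + 1 + (j - 1) - t by ring] using this
        · rintro ⟨hpar, hall⟩
          refine ⟨by omega, ?_⟩
          intro t ht htlt
          have := hall t (by omega) (by omega)
          simpa [show i + 1 + (j - 1) - t = i + j - t by ring] using this
      · rw [if_neg hm]
        constructor
        · intro h; omega
        · rintro ⟨-, hall⟩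
          exact absurd (hall i le_rfl (by omega)) (by simpa [show i + j - i = j by ring] using hm)
    · simp only [hlt, dif_neg, not_false_iff]
      constructor
      · intro h
        refine ⟨by omega, ?_⟩
        intro t ht htlt; omega
      · rintro ⟨hpar, -⟩; omega

-- the loop's end condition, started at (0, n-1) on a nonempty s, says exactly
-- "s is the pattern  replicate k c ++ replicate k d"  with k = n / 2.
theorem pattern_iff (s : List Char) (c d : Char) (hne : s ≠ []) :
    ((((s.length : Int) - 1) - 0) % 2 = 1 ∧ ∀ t : Int, 0 ≤ t → 2 * t < 0 + ((s.length : Int) - 1) →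
        PySem.List.pyGet? s t = some c ∧ PySem.List.pyGet? s (0 + ((s.length : Int) - 1) - t) = some d)
      ↔ s = List.replicate (s.length / 2) c ++ List.replicate (s.length / 2) d := by
  have hlen : 0 < s.length := List.length_pos_of_ne_nil hne
  constructor
  · rintro ⟨hpar, hall⟩
    have heven : s.length = 2 * (s.length / 2) := by omega
    set k := s.length / 2 with hk
    have hk1 : 1 ≤ k := by omega
    apply List.ext_getElem
    · simp only [List.length_append, List.length_replicate]; omega
    · intro m hm hm'
      by_cases hmk : m < k
      · have h := (hall (m : Int) (by positivity) (by omega)).1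
        rw [PySem.List.pyGet?_natCast, List.getElem?_eq_getElem hm] at h
        have hget : (List.replicate k c ++ List.replicate k d)[m] = c := by
          rw [List.getElem_append_left (by simpa using hmk)]
          simp
        rw [hget]
        exact Option.some.inj h
      · have h := (hall ((s.length : Int) - 1 - m) (by omega) (by omega)).2
        have hidx : 0 + ((s.length : Int) - 1) - ((s.length : Int) - 1 - (m : Int)) = (m : Int) := by ring
        rw [hidx, PySem.List.pyGet?_natCast, List.getElem?_eq_getElem hm] at h
        have hget : (List.replicate k c ++ List.replicate k d)[m] = d := by
          rw [List.getElem_append_right (by simpa using hmk)]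
          simp
        rw [hget]
        exact Option.some.inj h
  · intro hs
    have hlen2 : s.length = 2 * (s.length / 2) := by
      conv_lhs => rw [hs]
      simp only [List.length_append, List.length_replicate]; omega
    set k := s.length / 2 with hk
    have hk1 : 1 ≤ k := by omega
    refine ⟨by omega, ?_⟩
    intro t ht htlt
    have htk : t.toNat < k := by omega
    constructor
    · rw [PySem.List.pyGet?_of_nonneg s ht,
        List.getElem?_eq_getElem (show t.toNat < s.length by omega)]
      have : s[t.toNat] = c := by
        rw [List.getElem_of_eq hs, List.getElem_append_left (by simpa using htk)]
        simp
      rw [this]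
    · have hnn : (0 : Int) ≤ 0 + ((s.length : Int) - 1) - t := by omega
      rw [PySem.List.pyGet?_of_nonneg s hnn,
        List.getElem?_eq_getElem (show (0 + ((s.length : Int) - 1) - t).toNat < s.length by omega)]
      have hge : k ≤ (0 + ((s.length : Int) - 1) - t).toNat := by omega
      have : s[(0 + ((s.length : Int) - 1) - t).toNat] = d := by
        rw [List.getElem_of_eq hs, List.getElem_append_right (by simpa using hge)]
        simp
      rw [this]

-- one branch of A equals the corresponding pattern comparison of B
theorem branch_eq (s : List Char) (c d : Char) (hne : s ≠ []) :
    (if ((eqLoop s c d 0 (PySem.List.len s - 1)).1 - (eqLoop s c d 0 (PySem.List.len s - 1)).2 = 1)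
      then true else false)
      = (s == List.replicate (s.length / 2) c ++ List.replicate (s.length / 2) d) := by
  have hlen : 0 < s.length := List.length_pos_of_ne_nil hne
  rw [PySem.List.len_eq]
  have hspec := eqLoop_spec s c d (((s.length : Int) - 1) - 0).toNat 0 ((s.length : Int) - 1)
    rfl le_rfl (by omega)
  by_cases h : s = List.replicate (s.length / 2) c ++ List.replicate (s.length / 2) d
  · rw [if_pos (hspec.mpr ((pattern_iff s c d hne).mpr h))]
    exact (beq_iff_eq.mpr h).symm
  · rw [if_neg (fun hc => h ((pattern_iff s c d hne).mp (hspec.mp hc)))]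
    exact (beq_eq_false_iff_ne.mpr h).symm

-- ===== VERDICT (by name: the statement is the Claim_ definition above) =====
theorem equalZeroOne_spec : Claim_equal_equalZeroOne := by
  intro sub _ hpre
  unfold Spec_equalZeroOne
  have hne : sub.toList ≠ [] := fun h => hpre (String.toList_eq_nil_iff.mp h)
  simp only [equalZeroOne, equalZeroOne_alt]
  cases hget : PySem.List.pyGet? sub.toList 0 with
  | none =>
    rw [PySem.List.pyGet?_zero] at hget
    cases hl : sub.toList with
    | nil => exact absurd hl hne
    | cons a t => rw [hl] at hget; simp at hget
  | some first =>
    by_cases h0 : first = '0'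
    · subst h0
      rw [branch_eq sub.toList '0' '1' hne]
      simp
    · by_cases h1 : first = '1'
      · subst h1
        rw [branch_eq sub.toList '1' '0' hne]
        simp
      · simp [h0, h1]
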